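-- pv_equiv track=rewrite | github.com/johnphipps4/N-GramLanguageModel | Code/proj1.py | biCountUnk
-- ===== SOURCE A (Python) =====
-- def getUniCount(txt):
--     countdict = dict()
--     for word in txt:
--         if word in countdict:
--             countdict[word] += 1
--         else:
--             countdict[word] = 1
--     return countdict
--
-- def getBiCount(txt):
--     countdict = dict()
--     for i in range(len(txt)-1):
--         curr = txt[i]
--         nxt = txt[i+1]
--         if curr in countdict.keys():
--             if nxt in countdict[curr]:
--                 countdict[curr][nxt] += 1
--             else:
--                 countdict[curr][nxt] = 1
--         else:
--             countdict[curr] = {nxt: 1}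
--     return countdict
--
-- def biCountUnk(txt):
--     newlst = []
--     newlst = txt
--     unicount_old = getUniCount(txt)
--     for k,v in unicount_old.items():
--         if v == 1:
--             newlst[newlst.index(k)] = "<unk>"
--     return getBiCount(newlst)
-- ===== SOURCE B (Python) =====
-- def biCountUnk(txt):
--     # one counting pass, in-place hapax replacement via slice assignment,
--     # then a flat pair-count table reshaped into the nested dict
--     cnt = {}
--     for w in txt:
--         cnt[w] = cnt.get(w, 0) + 1
--     txt[:] = ["<unk>" if cnt[w] == 1 else w for w in txt]
--     flat = {}
--     for pair in zip(txt, txt[1:]):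
--         flat[pair] = flat.get(pair, 0) + 1
--     out = {}
--     for (cur, nxt), c in flat.items():
--         out.setdefault(cur, {})[nxt] = c
--     return out
-- ===== Notes on version B (the rewrite author's own statement) =====
-- stated objective: faster
-- what changed: B replaces A's per-hapax list.index scans (quadratic when many words occur once) and A's incremental nested-dict growth by one counting pass, an in-place slice-assignment replacement, and a flat (curr,nxt)-keyed counter that is reshaped into the nested dict in a final pass.
import Mathlib
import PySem

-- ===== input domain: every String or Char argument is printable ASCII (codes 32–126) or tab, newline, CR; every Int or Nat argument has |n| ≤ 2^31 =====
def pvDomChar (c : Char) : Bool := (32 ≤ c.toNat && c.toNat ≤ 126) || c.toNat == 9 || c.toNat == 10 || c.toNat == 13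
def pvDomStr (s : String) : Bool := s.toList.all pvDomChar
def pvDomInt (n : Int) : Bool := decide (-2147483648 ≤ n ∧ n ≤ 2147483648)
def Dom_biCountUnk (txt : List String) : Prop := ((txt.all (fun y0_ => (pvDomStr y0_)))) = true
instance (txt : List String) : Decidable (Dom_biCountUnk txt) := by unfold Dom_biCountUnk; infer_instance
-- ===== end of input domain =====

-- B replaces A's per-hapax list.index scans and incremental nested-dict growth by one counting
-- pass, a map-style in-place replacement, and a flat pair-counter reshaped into the nested dict;
-- equivalence of the RETURN value is proved (both Pythons also mutate txt identically).

-- ===== PORT A =====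
def getUniCount (txt : List String) : PySem.Dict String Int :=
  txt.foldl (fun countdict word =>
    if countdict.contains word then countdict.insert word (countdict.getD word 0 + 1)
    else countdict.insert word 1) PySem.Dict.empty

def getBiCount (txt : List String) : PySem.Dict String (PySem.Dict String Int) :=
  (PySem.List.pyRange 0 (PySem.List.len txt - 1)).foldl (fun countdict i =>
    let curr := PySem.List.pyGetD txt i ""
    let nxt := PySem.List.pyGetD txt (i + 1) ""
    if countdict.contains curr then
      let inner := countdict.getD curr PySem.Dict.empty
      if inner.contains nxt then countdict.insert curr (inner.insert nxt (inner.getD nxt 0 + 1))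
      else countdict.insert curr (inner.insert nxt 1)
    else countdict.insert curr (PySem.Dict.empty.insert nxt 1)) PySem.Dict.empty

def biCountUnk (txt : List String) : List (String × List (String × Int)) :=
  let unicount_old := getUniCount txt
  let newlst := unicount_old.items.foldl (fun newlst kv =>
    if kv.2 == (1 : Int) then
      match PySem.List.index? newlst kv.1 with
      | some i => newlst.set i "<unk>"
      | none => newlst
    else newlst) txt
  (getBiCount newlst).items.map (fun p => (p.1, p.2.items))

-- ===== PORT B =====
def biCountUnk_alt (txt : List String) : List (String × List (String × Int)) :=
  let cnt := txt.foldl (fun cnt w => cnt.insert w (cnt.getD w 0 + 1)) PySem.Dict.empty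
  let txt2 := txt.map (fun w => if cnt.getD w 0 == (1 : Int) then "<unk>" else w)
  let flat := (txt2.zip (PySem.List.slice txt2 (some 1) none)).foldl
      (fun flat pair => flat.insert pair (flat.getD pair 0 + 1))
      (PySem.Dict.empty : PySem.Dict (String × String) Int)
  let out := flat.items.foldl (fun out p =>
      out.modify p.1.1 PySem.Dict.empty (fun inner => inner.insert p.1.2 p.2))
    (PySem.Dict.empty : PySem.Dict String (PySem.Dict String Int))
  out.items.map (fun p => (p.1, p.2.items))

-- ===== PRECONDITION & SPEC =====
def Spec_biCountUnk (txt : List String) (out : List (String × List (String × Int))) : Prop := out = biCountUnk_alt txt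
instance (txt : List String) (out : List (String × List (String × Int))) : Decidable (Spec_biCountUnk txt out) := by unfold Spec_biCountUnk; infer_instance

-- ===== CLAIM (what is proved, stated in full; the proofs are below) =====
def Claim_equal_biCountUnk : Prop := ∀ (txt : List String), Dom_biCountUnk txt → Spec_biCountUnk txt (biCountUnk txt)

-- ===== LEMMAS AND PROOFS =====

-- step functions used by the proofs
def uStep (d : PySem.Dict String (PySem.Dict String Int)) (c n : String) :
    PySem.Dict String (PySem.Dict String Int) :=
  d.insert c ((d.getD c PySem.Dict.empty).insert n ((d.getD c PySem.Dict.empty).getD n 0 + 1))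

def fStep (d : PySem.Dict (String × String) Int) (p : String × String) :
    PySem.Dict (String × String) Int :=
  d.insert p (d.getD p 0 + 1)

def rStep (out : PySem.Dict String (PySem.Dict String Int)) (p : (String × String) × Int) :
    PySem.Dict String (PySem.Dict String Int) :=
  out.insert p.1.1 ((out.getD p.1.1 PySem.Dict.empty).insert p.1.2 p.2)

def setVal (out : PySem.Dict String (PySem.Dict String Int)) (c n : String) (w : Int) :
    PySem.Dict String (PySem.Dict String Int) :=
  out.insert c ((out.getD c PySem.Dict.empty).insert n w)

def hapaxMap (txt P : List String) : List String :=
  txt.map (fun w => if txt.count w = 1 ∧ w ∈ P then "<unk>" else w)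

-- inserting at a key already present commutes (as a dict, items included) with any other insert
lemma insert_comm_of_mem {κ ν : Type} [BEq κ] [LawfulBEq κ] (d : PySem.Dict κ ν)
    (k k' : κ) (X Y : ν) (hk : k ∈ d.keys) (hne : k' ≠ k) :
    (d.insert k X).insert k' Y = (d.insert k' Y).insert k X := by
  have hc : d.contains k = true := (PySem.Dict.contains_iff_mem_keys d k).mpr hk
  have hbne : (k' == k) = false := by simp [hne]
  have hbne' : (k == k') = false := by simp [(Ne.symm hne : k ≠ k')]
  apply PySem.Dict.ext
  by_cases hc' : d.contains k' = true
  · rw [PySem.Dict.items_insert_of_contains _ Y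
          (by rw [PySem.Dict.contains_insert]; simp [hc', hbne]),
        PySem.Dict.items_insert_of_contains _ X hc,
        PySem.Dict.items_insert_of_contains _ X
          (by rw [PySem.Dict.contains_insert]; simp [hc, hbne']),
        PySem.Dict.items_insert_of_contains _ Y hc',
        List.map_map, List.map_map]
    apply List.map_congr_left
    intro p _
    simp only [Function.comp]
    by_cases h1 : (p.1 == k) = true
    · have h2 : (p.1 == k') = false := by
        have : p.1 = k := by simpa using h1
        simp [this, (Ne.symm hne : k ≠ k')]
      simp [h1, h2, hbne']
    · by_cases h2 : (p.1 == k') = true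
      · simp [h1, h2, hbne]
      · simp [h1, h2]
  · have hc'f : d.contains k' = false := by simpa using hc'
    rw [PySem.Dict.items_insert_of_not_contains _ Y
          (by rw [PySem.Dict.contains_insert]; simp [hc'f, hbne]),
        PySem.Dict.items_insert_of_contains _ X hc,
        PySem.Dict.items_insert_of_contains _ X
          (by rw [PySem.Dict.contains_insert]; simp [hc]),
        PySem.Dict.items_insert_of_not_contains _ Y hc'f,
        List.map_append]
    simp
    exact fun h => absurd h hne

lemma sv_rstep_comm (out : PySem.Dict String (PySem.Dict String Int)) (c n : String) (w : Int)
    (p : (String × String) × Int) (hne : p.1 ≠ (c, n))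
    (hn : n ∈ (out.getD c PySem.Dict.empty).keys) :
    rStep (setVal out c n w) p = setVal (rStep out p) c n w := by
  obtain ⟨⟨c', n'⟩, v'⟩ := p
  have hcmem : c ∈ out.keys := by
    by_cases h : out.contains c = true
    · exact (PySem.Dict.contains_iff_mem_keys out c).mp h
    · rw [PySem.Dict.getD_of_not_contains out _ (by simpa using h), PySem.Dict.keys_empty] at hn
      exact absurd hn (List.not_mem_nil)
  by_cases hcc : c' = c
  · subst hcc
    have hnn : n' ≠ n := fun h => hne (by simp [h])
    simp only [rStep, setVal, PySem.Dict.getD_insert_self, PySem.Dict.insert_insert_self]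
    exact congrArg _ (insert_comm_of_mem _ n n' w v' hn hnn)
  · simp only [rStep, setVal]
    rw [PySem.Dict.getD_insert_of_ne _ _ _ hcc,
        PySem.Dict.getD_insert_of_ne _ _ _ (Ne.symm hcc)]
    exact insert_comm_of_mem out c c' _ _ hcmem hcc

lemma mem_keys_rstep (out : PySem.Dict String (PySem.Dict String Int)) (c n : String)
    (p : (String × String) × Int) (hn : n ∈ (out.getD c PySem.Dict.empty).keys) :
    n ∈ ((rStep out p).getD c PySem.Dict.empty).keys := by
  obtain ⟨⟨c', n'⟩, v'⟩ := p
  by_cases hcc : c' = c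
  · subst hcc
    simp only [rStep, PySem.Dict.getD_insert_self]
    exact (PySem.Dict.mem_keys_insert _ _ _ _).mpr (Or.inr hn)
  · simpa only [rStep, PySem.Dict.getD_insert_of_ne _ _ _ (fun h => hcc h.symm)] using hn

lemma inc_comm (c n : String) (w : Int) (rest : List ((String × String) × Int)) :
    ∀ out, (∀ p ∈ rest, p.1 ≠ (c, n)) → n ∈ (out.getD c PySem.Dict.empty).keys →
    rest.foldl rStep (setVal out c n w) = setVal (rest.foldl rStep out) c n w := by
  induction rest with
  | nil => intro out _ _; rfl
  | cons e t ih =>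
    intro out h hn
    simp only [List.foldl_cons]
    rw [sv_rstep_comm out c n w e (h e (List.mem_cons_self)) hn]
    exact ih (rStep out e) (fun p hp => h p (List.mem_cons_of_mem _ hp)) (mem_keys_rstep out c n e hn)

lemma resh_map_subst (c n : String) (w : Int) :
    ∀ (its : List ((String × String) × Int)) out, (its.map (·.1)).Nodup → (c, n) ∈ its.map (·.1) →
    (its.map (fun p => if p.1 == (c, n) then ((c, n), w) else p)).foldl rStep out
      = setVal (its.foldl rStep out) c n w := by
  intro its
  induction its with
  | nil => intro out _ hm; simp at hm
  | cons e t ih =>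
    intro out hnd hm
    obtain ⟨⟨kc, kn⟩, v'⟩ := e
    have hnd' : ((kc, kn) :: t.map (·.1)).Nodup := by simpa using hnd
    rw [List.map_cons] at hm
    by_cases hb : (kc, kn) = (c, n)
    · have hnt : (c, n) ∉ t.map (·.1) := by
        rw [← hb]; exact (List.nodup_cons.mp hnd').1
      have htid : t.map (fun p => if p.1 == (c, n) then ((c, n), w) else p) = t := by
        apply List.map_congr_left ?_ |>.trans (List.map_id t)
        intro p hp
        have : p.1 ≠ (c, n) := fun h => hnt (h ▸ List.mem_map_of_mem hp)
        simp [this]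
      simp only [List.map_cons, List.foldl_cons, hb, htid,
        if_pos (by simp : (((c, n) : String × String) == (c, n)) = true)]
      have h1 : rStep out ((c, n), w) = setVal (rStep out ((c, n), v')) c n w := by
        simp only [rStep, setVal, PySem.Dict.getD_insert_self, PySem.Dict.insert_insert_self]
      rw [h1]
      exact inc_comm c n w t (rStep out ((c, n), v'))
        (fun p hp => fun h => hnt (h ▸ List.mem_map_of_mem hp))
        (by simp only [rStep, PySem.Dict.getD_insert_self]
            exact (PySem.Dict.mem_keys_insert _ _ _ _).mpr (Or.inl rfl))
    · have hbb : (((kc, kn) : String × String) == (c, n)) = false := beq_eq_false_iff_ne.mpr hb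
      have hmt : (c, n) ∈ t.map (·.1) := by
        rcases List.mem_cons.mp hm with h | h
        · exact absurd h.symm hb
        · exact h
      simp only [List.map_cons, List.foldl_cons, hbb, Bool.false_eq_true, if_false]
      exact ih (rStep out ((kc, kn), v')) (List.nodup_cons.mp hnd').2 hmt

lemma resh_insert (d : PySem.Dict (String × String) Int) (c n : String) (w : Int)
    (hnd : d.keys.Nodup) :
    ((d.insert (c, n) w).items.foldl rStep PySem.Dict.empty)
      = setVal (d.items.foldl rStep PySem.Dict.empty) c n w := by
  have hkeys : d.keys = d.items.map (·.1) := by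
    obtain ⟨items⟩ := d; simp [PySem.Dict.keys_mk]
  by_cases hco : d.contains (c, n) = true
  · rw [PySem.Dict.items_insert_of_contains _ w hco]
    exact resh_map_subst c n w d.items PySem.Dict.empty (hkeys ▸ hnd)
      (hkeys ▸ (PySem.Dict.contains_iff_mem_keys d (c, n)).mp hco)
  · rw [PySem.Dict.items_insert_of_not_contains _ w (by simpa using hco), List.foldl_append]
    rfl

lemma resh_get? (c n : String) :
    ∀ (its : List ((String × String) × Int)) out, (its.map (·.1)).Nodup →
    ((its.foldl rStep out).getD c PySem.Dict.empty).get? n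
      = ((PySem.Dict.mk its).get? (c, n)).or ((out.getD c PySem.Dict.empty).get? n) := by
  intro its
  induction its with
  | nil =>
    intro out _
    have : (PySem.Dict.mk ([] : List ((String × String) × Int))).get? (c, n) = none := rfl
    simp [this]
  | cons e t ih =>
    intro out hnd
    obtain ⟨⟨c', n'⟩, v'⟩ := e
    simp only [List.foldl_cons]
    rw [ih (rStep out ((c', n'), v')) (by simpa using (List.nodup_cons.mp (by simpa using hnd)).2),
        PySem.Dict.get?_mk_cons]
    by_cases hb : (c', n') = (c, n)
    · have hnt : (PySem.Dict.mk t).get? (c, n) = none := by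
        rw [PySem.Dict.get?_eq_none_iff_not_mem_keys, PySem.Dict.keys_mk, ← hb]
        exact (List.nodup_cons.mp (by simpa using hnd)).1
      rw [hnt]
      rw [Prod.mk.injEq] at hb
      obtain ⟨h1, h2⟩ := hb
      simp only [h1, h2, rStep, PySem.Dict.getD_insert_self, PySem.Dict.get?_insert_self,
        Option.none_or, if_pos (by simp : (((c, n) : String × String) == (c, n)) = true),
        Option.some_or]
    · have hstep : ((rStep out ((c', n'), v')).getD c PySem.Dict.empty).get? n
          = ((out.getD c PySem.Dict.empty).get? n) := by
        by_cases hcc : c' = c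
        · subst hcc
          have hnn : n ≠ n' := fun h => hb (by simp [h])
          simp only [rStep, PySem.Dict.getD_insert_self]
          exact PySem.Dict.get?_insert_of_ne _ _ hnn
        · simp only [rStep]
          rw [PySem.Dict.getD_insert_of_ne _ _ _ (fun h => hcc h.symm)]
      rw [hstep, if_neg (by simpa using hb)]

lemma bigram_eq (ps : List (String × String)) :
    ((ps.foldl fStep PySem.Dict.empty).items.foldl rStep PySem.Dict.empty)
      = ps.foldl (fun d p => uStep d p.1 p.2) PySem.Dict.empty := by
  induction ps using List.reverseRecOn with
  | nil => rfl
  | append_singleton qs p ih =>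
    obtain ⟨c, n⟩ := p
    have hnd : (qs.foldl fStep PySem.Dict.empty).keys.Nodup := by
      have := PySem.Dict.nodup_keys_foldl_insert qs
        (fun (d : PySem.Dict (String × String) Int) x => d.getD x 0 + 1)
        PySem.Dict.empty (by rw [PySem.Dict.keys_empty]; exact List.nodup_nil)
      exact this
    simp only [List.foldl_append, List.foldl_cons, List.foldl_nil]
    set d := qs.foldl fStep PySem.Dict.empty with hd
    have hgd : d.getD (c, n) 0 = ((d.items.foldl rStep PySem.Dict.empty).getD c
        PySem.Dict.empty).getD n 0 := by
      rw [PySem.Dict.getD_eq_get?_getD, PySem.Dict.getD_eq_get?_getD,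
          resh_get? c n d.items PySem.Dict.empty
            (by have hk : d.keys = d.items.map (·.1) := by
                  obtain ⟨items⟩ := d; simp [PySem.Dict.keys_mk]
                exact hk ▸ hnd)]
      have h0 : ((PySem.Dict.empty : PySem.Dict String (PySem.Dict String Int)).getD c
          PySem.Dict.empty).get? n = none := by
        rw [PySem.Dict.getD_empty, PySem.Dict.get?_empty]
      rw [h0, Option.or_none]
    show (fStep d (c, n)).items.foldl rStep PySem.Dict.empty = _
    rw [show fStep d (c, n) = d.insert (c, n) (d.getD (c, n) 0 + 1) from rfl,
        resh_insert d c n _ hnd, hgd, ih]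
    rfl

-- A's range loop over indices = fold over adjacent pairs
lemma natrange_zip {α β : Type} (dflt : α) (g : β → α → α → β) :
    ∀ (l : List α) (init : β),
    (List.range (l.length - 1)).foldl (fun acc j => g acc (l.getD j dflt) (l.getD (j+1) dflt)) init
      = (l.zip l.tail).foldl (fun acc p => g acc p.1 p.2) init := by
  intro l
  induction l with
  | nil => intro init; simp
  | cons x l ih =>
    intro init
    cases l with
    | nil => simp
    | cons y t =>
      have hbody : ∀ (acc : β), ∀ j ∈ List.range t.length,
          g acc ((x :: y :: t).getD (Nat.succ j) dflt) ((x :: y :: t).getD (Nat.succ j + 1) dflt)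
            = g acc ((y :: t).getD j dflt) ((y :: t).getD (j + 1) dflt) := by
        intro acc j _
        rw [show Nat.succ j = j + 1 from rfl, List.getD_cons_succ, List.getD_cons_succ]
      calc (List.range ((x :: y :: t).length - 1)).foldl
              (fun acc j => g acc ((x :: y :: t).getD j dflt) ((x :: y :: t).getD (j+1) dflt)) init
          = (List.range t.length).foldl
              (fun acc j => g acc ((x :: y :: t).getD (Nat.succ j) dflt)
                ((x :: y :: t).getD (Nat.succ j + 1) dflt)) (g init x y) := by
            rw [show (x :: y :: t).length - 1 = t.length + 1 from rfl, List.range_succ_eq_map,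
                List.foldl_cons, List.foldl_map]
            try rfl
        _ = (List.range t.length).foldl
              (fun acc j => g acc ((y :: t).getD j dflt) ((y :: t).getD (j + 1) dflt))
              (g init x y) := PySem.List.foldl_congr_mem _ _ _ _ hbody
        _ = ((y :: t).zip (y :: t).tail).foldl (fun acc p => g acc p.1 p.2) (g init x y) :=
            ih (g init x y)
        _ = ((x :: y :: t).zip (x :: y :: t).tail).foldl (fun acc p => g acc p.1 p.2) init := rfl

lemma pyRange_self (a : Int) : PySem.List.pyRange a a = [] := by
  have h := PySem.List.pyRange_one_append a a a le_rfl le_rfl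
  have hlen := congrArg List.length h
  rw [List.length_append] at hlen
  exact List.eq_nil_of_length_eq_zero (by omega)

lemma pyRange_zero_natCast (k : Nat) :
    PySem.List.pyRange 0 (k : Int) = List.map (fun (j : Nat) => (j : Int)) (List.range k) := by
  induction k with
  | zero => rfl
  | succ k ih =>
    have h1 : PySem.List.pyRange 0 ((k + 1 : Nat) : Int)
        = PySem.List.pyRange 0 (k : Int) ++ PySem.List.pyRange (k : Int) ((k + 1 : Nat) : Int) := by
      exact PySem.List.pyRange_one_append 0 (k : Int) ((k + 1 : Nat) : Int)
        (by positivity) (by push_cast; omega)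
    have h2 : PySem.List.pyRange (k : Int) ((k + 1 : Nat) : Int) = [(k : Int)] := by
      rw [PySem.List.pyRange_one_cons (by push_cast; omega)]
      rw [show ((k : Int) + 1) = ((k + 1 : Nat) : Int) by push_cast; ring, pyRange_self]
    rw [h1, h2, ih, List.range_succ, List.map_append]
    try rfl

lemma range_zip {α β : Type} (dflt : α) (g : β → α → α → β) (l : List α) (init : β) :
    (PySem.List.pyRange 0 (PySem.List.len l - 1)).foldl
        (fun acc i => g acc (PySem.List.pyGetD l i dflt) (PySem.List.pyGetD l (i + 1) dflt)) init
      = (l.zip l.tail).foldl (fun acc p => g acc p.1 p.2) init := by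
  have hlen : PySem.List.len l = (l.length : Int) := rfl
  cases l with
  | nil => rfl
  | cons x t =>
    rw [hlen]
    have hcast : ((x :: t).length : Int) - 1 = (((x :: t).length - 1 : Nat) : Int) := by
      simp
    have hbody : ∀ (acc : β), ∀ j ∈ List.range ((x :: t).length - 1),
        g acc (PySem.List.pyGetD (x :: t) (j : Int) dflt)
          (PySem.List.pyGetD (x :: t) ((j : Int) + 1) dflt)
          = g acc ((x :: t).getD j dflt) ((x :: t).getD (j + 1) dflt) := by
      intro acc j _
      rw [show ((j : Int) + 1) = ((j + 1 : Nat) : Int) by push_cast; ring,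
          PySem.List.pyGetD_natCast, PySem.List.pyGetD_natCast]
    calc (PySem.List.pyRange 0 (((x :: t).length : Int) - 1)).foldl
            (fun acc i => g acc (PySem.List.pyGetD (x :: t) i dflt)
              (PySem.List.pyGetD (x :: t) (i + 1) dflt)) init
        = (List.range ((x :: t).length - 1)).foldl
            (fun acc (j : Nat) => g acc (PySem.List.pyGetD (x :: t) (j : Int) dflt)
              (PySem.List.pyGetD (x :: t) ((j : Int) + 1) dflt)) init := by
          rw [hcast, pyRange_zero_natCast, List.foldl_map]
      _ = (List.range ((x :: t).length - 1)).foldl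
            (fun acc j => g acc ((x :: t).getD j dflt) ((x :: t).getD (j + 1) dflt)) init :=
          PySem.List.foldl_congr_mem _ _ _ _ hbody
      _ = ((x :: t).zip (x :: t).tail).foldl (fun acc p => g acc p.1 p.2) init :=
          natrange_zip dflt g (x :: t) init

lemma bstep_eq (d : PySem.Dict String (PySem.Dict String Int)) (c n : String) :
    (if d.contains c then
       let inner := d.getD c PySem.Dict.empty
       if inner.contains n then d.insert c (inner.insert n (inner.getD n 0 + 1))
       else d.insert c (inner.insert n 1)
     else d.insert c (PySem.Dict.empty.insert n 1)) = uStep d c n := by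
  by_cases hc : d.contains c = true
  · simp only [hc, if_true]
    by_cases hn : (d.getD c PySem.Dict.empty).contains n = true
    · simp [hn, uStep]
    · have h0 : (d.getD c PySem.Dict.empty).getD n 0 = 0 :=
        PySem.Dict.getD_of_not_contains _ _ (by simpa using hn)
      simp [hn, uStep, h0]
  · have hc' : d.contains c = false := by simpa using hc
    have h1 : d.getD c PySem.Dict.empty = PySem.Dict.empty :=
      PySem.Dict.getD_of_not_contains _ _ hc'
    simp [hc', uStep, h1, PySem.Dict.getD_empty]

lemma getBiCount_eq (l : List String) :
    getBiCount l = (l.zip l.tail).foldl (fun d p => uStep d p.1 p.2) PySem.Dict.empty := by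
  have h := range_zip "" (fun (d : PySem.Dict String (PySem.Dict String Int)) c n =>
    if d.contains c then
      let inner := d.getD c PySem.Dict.empty
      if inner.contains n then d.insert c (inner.insert n (inner.getD n 0 + 1))
      else d.insert c (inner.insert n 1)
    else d.insert c (PySem.Dict.empty.insert n 1)) l PySem.Dict.empty
  refine Eq.trans ?_ (PySem.List.foldl_congr_mem _ _ _ _ (fun acc p _ => bstep_eq acc p.1 p.2))
  exact h

lemma getUniCount_eq (txt : List String) : getUniCount txt = PySem.Dict.counter txt := by
  unfold getUniCount
  rw [PySem.List.foldl_congr_mem txt _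
      (fun (d : PySem.Dict String Int) w => d.insert w (d.getD w 0 + 1)) PySem.Dict.empty
      (fun d w _ => by
        by_cases hc : d.contains w = true
        · simp [hc]
        · have h0 : d.getD w 0 = 0 := PySem.Dict.getD_of_not_contains d _ (by simpa using hc)
          simp [hc, h0])]
  exact PySem.Dict.foldl_insert_getD_add_one_eq_counter txt

-- index? finds the element it reports
lemma index?_cons (x a : String) (l : List String) :
    PySem.List.index? (x :: l) a
      = if x == a then some 0 else (PySem.List.index? l a).map (· + 1) := by
  by_cases hxa : x = a <;> simp [PySem.List.index?, List.idxOf?_cons, hxa]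

lemma index?_get (a : String) : ∀ (l : List String) (i : Nat),
    PySem.List.index? l a = some i → l[i]? = some a := by
  intro l i h
  have h' : List.idxOf? a l = some i := by simpa [PySem.List.index?] using h
  obtain ⟨hi, hEq, -⟩ := List.idxOf?_eq_some_iff.mp h'
  rw [List.getElem?_eq_getElem hi, hEq]

lemma set_getElem?_self (a : String) : ∀ (l : List String) (i : Nat),
    l[i]? = some a → l.set i a = l := by
  intro l i h
  apply List.ext_getElem?
  intro j
  rw [List.getElem?_set]
  split_ifs with hij hlt
  · subst hij; exact h.symm
  · exfalso
    have hn : l[i]? = none := List.getElem?_eq_none (by omega)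
    rw [h] at hn
    exact Option.some_ne_none a hn
  · rfl

-- one hapax-replacement step, k not yet processed
lemma hapax_step_gen (k : String) (g g' : String → String) :
    ∀ (l : List String), l.count k = 1 → g k = k → (∀ w ∈ l, g w = k ↔ w = k) →
    (∀ w ∈ l, w ≠ k → g' w = g w) → g' k = "<unk>" →
    (match PySem.List.index? (l.map g) k with
     | some i => (l.map g).set i "<unk>"
     | none => l.map g) = l.map g' := by
  intro l
  induction l with
  | nil => intro h1 _ _ _ _; simp at h1
  | cons x t ih =>
    intro h1 hgk hiff hgg hk
    by_cases hxk : x = k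
    · subst hxk
      have ht0 : x ∉ t := by
        rw [← List.count_eq_zero (a := x)]
        simp only [List.count_cons, BEq.rfl, if_true] at h1
        omega
      have hidx : PySem.List.index? ((x :: t).map g) x = some 0 := by
        rw [List.map_cons, index?_cons]
        simp [hgk]
      rw [hidx]
      simp only [List.map_cons, List.set_cons_zero, hk]
      exact congrArg _ (List.map_congr_left
        (fun w hw => (hgg w (List.mem_cons_of_mem _ hw)
          (fun h => ht0 (h ▸ hw))).symm))
    · have hgx : (g x == k) = false :=
        beq_eq_false_iff_ne.mpr (fun h => hxk ((hiff x List.mem_cons_self).mp h))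
      have h1t : t.count k = 1 := by
        simp only [List.count_cons, beq_eq_false_iff_ne.mpr hxk, Bool.false_eq_true,
          if_false, add_zero] at h1
        exact h1
      have hifft : ∀ w ∈ t, g w = k ↔ w = k :=
        fun w hw => hiff w (List.mem_cons_of_mem _ hw)
      have hggt : ∀ w ∈ t, w ≠ k → g' w = g w :=
        fun w hw => hgg w (List.mem_cons_of_mem _ hw)
      have hg'x : g' x = g x := hgg x List.mem_cons_self hxk
      rw [List.map_cons, index?_cons, hgx]
      cases hidx : PySem.List.index? (t.map g) k with
      | none =>
        have := ih h1t hgk hifft hggt hk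
        rw [hidx] at this
        simp only [Bool.false_eq_true, if_false, Option.map_none, List.map_cons, hg'x]
        exact congrArg _ this
      | some i =>
        have := ih h1t hgk hifft hggt hk
        rw [hidx] at this
        simp only [Bool.false_eq_true, if_false, Option.map_some, List.set_cons_succ,
          List.map_cons, hg'x]
        exact congrArg _ this

lemma hapax_step_unk (g g' : String → String) (l : List String)
    (hgg : ∀ w ∈ l, g' w = g w) :
    (match PySem.List.index? (l.map g) "<unk>" with
     | some i => (l.map g).set i "<unk>"
     | none => l.map g) = l.map g' := by
  have hmap : l.map g' = l.map g := List.map_congr_left hgg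
  cases hidx : PySem.List.index? (l.map g) "<unk>" with
  | none => exact hmap.symm
  | some i =>
    show (List.map g l).set i "<unk>" = List.map g' l
    rw [set_getElem?_self _ _ _ (index?_get _ _ _ hidx)]
    exact hmap.symm

lemma hapax_fold (txt : List String) :
    ∀ (ks P : List String), ks.Nodup → (∀ k ∈ ks, k ∉ P) →
    ks.foldl (fun l k =>
        if ((txt.count k : Int) == 1) then
          (match PySem.List.index? l k with
           | some i => l.set i "<unk>"
           | none => l)
        else l) (hapaxMap txt P)
      = hapaxMap txt (P ++ ks) := by
  intro ks
  induction ks with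
  | nil => intro P _ _; simp
  | cons k t ih =>
    intro P hnd hP
    have hkP : k ∉ P := hP k List.mem_cons_self
    have hndt : t.Nodup := (List.nodup_cons.mp hnd).2
    have hknt : k ∉ t := (List.nodup_cons.mp hnd).1
    have hPt : ∀ k' ∈ t, k' ∉ P ++ [k] := by
      intro k' hk'
      simp only [List.mem_append, List.mem_singleton]
      rintro (h | rfl)
      · exact hP k' (List.mem_cons_of_mem _ hk') h
      · exact hknt hk'
    rw [List.foldl_cons, show P ++ k :: t = (P ++ [k]) ++ t by simp]
    by_cases hc : txt.count k = 1
    · rw [if_pos (show ((txt.count k : Int) == (1 : Int)) = true by simp [hc])]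
      have hstep : (match PySem.List.index? (hapaxMap txt P) k with
          | some i => (hapaxMap txt P).set i "<unk>"
          | none => hapaxMap txt P) = hapaxMap txt (P ++ [k]) := by
        by_cases hunk : k = "<unk>"
        · subst hunk
          apply hapax_step_unk
          intro w hw
          by_cases hw' : w = "<unk>"
          · subst hw'; split_ifs <;> rfl
          · simp only [List.mem_append, List.mem_singleton, hw', or_false]
        · apply hapax_step_gen k _ _ txt hc
          · simp [hkP]
          · intro w hw
            constructor
            · intro h
              by_cases hcond : txt.count w = 1 ∧ w ∈ P
              · rw [if_pos hcond] at h; exact absurd h.symm hunk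
              · rwa [if_neg hcond] at h
            · rintro rfl
              simp [hkP]
          · intro w hw hwk
            simp only [List.mem_append, List.mem_singleton, hwk, or_false]
          · simp [hc, hkP]
      rw [hstep]
      exact ih (P ++ [k]) hndt hPt
    · rw [if_neg (show ¬ ((txt.count k : Int) == (1 : Int)) = true by
        simp [show (txt.count k : Int) ≠ 1 from by exact_mod_cast hc])]
      have hPk : hapaxMap txt P = hapaxMap txt (P ++ [k]) := by
        apply List.map_congr_left
        intro w hw
        by_cases hwk : w = k
        · subst hwk; simp [hc]
        · simp only [List.mem_append, List.mem_singleton, hwk, or_false]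
      rw [hPk]
      exact ih (P ++ [k]) hndt hPt

-- ===== VERDICT (by name: the statement is the Claim_ definition above) =====
theorem biCountUnk_spec : Claim_equal_biCountUnk := by
  unfold Claim_equal_biCountUnk
  intro txt _
  unfold Spec_biCountUnk
  simp only [biCountUnk, biCountUnk_alt]
  have hcnt : txt.foldl (fun (cnt : PySem.Dict String Int) w => cnt.insert w (cnt.getD w 0 + 1))
      PySem.Dict.empty = PySem.Dict.counter txt :=
    PySem.Dict.foldl_insert_getD_add_one_eq_counter txt
  have hstartEq : hapaxMap txt [] = txt := by
    unfold hapaxMap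
    refine (List.map_congr_left ?_).trans (List.map_id txt)
    intro w _
    simp
  have hrepl : (getUniCount txt).items.foldl (fun newlst kv =>
      if kv.2 == (1 : Int) then
        match PySem.List.index? newlst kv.1 with
        | some i => newlst.set i "<unk>"
        | none => newlst
      else newlst) txt = hapaxMap txt (PySem.Set.ofList txt) := by
    have hitems : (getUniCount txt).items
        = (PySem.Set.ofList txt).map (fun k => (k, (txt.count k : Int))) := by
      rw [getUniCount_eq, PySem.Dict.items_counter]
    calc (getUniCount txt).items.foldl (fun newlst kv =>
          if kv.2 == (1 : Int) then
            match PySem.List.index? newlst kv.1 with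
            | some i => newlst.set i "<unk>"
            | none => newlst
          else newlst) txt
        = (PySem.Set.ofList txt).foldl (fun newlst k =>
            if ((txt.count k : Int) == (1 : Int)) then
              match PySem.List.index? newlst k with
              | some i => newlst.set i "<unk>"
              | none => newlst
            else newlst) txt := by rw [hitems, List.foldl_map]
      _ = (PySem.Set.ofList txt).foldl (fun newlst k =>
            if ((txt.count k : Int) == (1 : Int)) then
              match PySem.List.index? newlst k with
              | some i => newlst.set i "<unk>"
              | none => newlst
            else newlst) (hapaxMap txt []) := by rw [hstartEq]
      _ = hapaxMap txt ([] ++ PySem.Set.ofList txt) :=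
          hapax_fold txt (PySem.Set.ofList txt) [] (PySem.Set.nodup_ofList txt)
            (fun _ _ h => (List.not_mem_nil h).elim)
      _ = hapaxMap txt (PySem.Set.ofList txt) := by rw [List.nil_append]
  have htxt2 : txt.map (fun w =>
        if (PySem.Dict.counter txt).getD w 0 == (1 : Int) then "<unk>" else w)
      = hapaxMap txt (PySem.Set.ofList txt) := by
    apply List.map_congr_left
    intro w hw
    rw [PySem.Dict.getD_counter]
    have hmem : w ∈ PySem.Set.ofList txt := (PySem.Set.mem_ofList txt w).mpr hw
    by_cases hcw : txt.count w = 1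
    · simp [hcw, hmem]
    · have hne : ((txt.count w : Int) == (1 : Int)) = false := by
        simp [show (txt.count w : Int) ≠ 1 from by exact_mod_cast hcw]
      simp [hne, hcw]
  set t2 := hapaxMap txt (PySem.Set.ofList txt) with ht2
  have hdict : getBiCount (hapaxMap txt (PySem.Set.ofList txt))
      = ((t2.zip (PySem.List.slice t2 (some 1) none)).foldl
          (fun flat pair => flat.insert pair (flat.getD pair 0 + 1))
          PySem.Dict.empty).items.foldl (fun out p =>
            out.modify p.1.1 PySem.Dict.empty (fun inner => inner.insert p.1.2 p.2))
          PySem.Dict.empty := by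
    have hslice : PySem.List.slice t2 (some 1) none = t2.tail := by
      rw [PySem.List.slice_from t2 (by omega : (0 : Int) ≤ 1)]
      exact List.drop_one
    rw [hslice]
    calc getBiCount t2
        = (t2.zip t2.tail).foldl (fun d p => uStep d p.1 p.2) PySem.Dict.empty :=
          getBiCount_eq t2
      _ = ((t2.zip t2.tail).foldl fStep PySem.Dict.empty).items.foldl rStep
            PySem.Dict.empty := (bigram_eq (t2.zip t2.tail)).symm
  rw [hcnt, htxt2, hrepl, hdict]
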